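-- pv_equiv track=rewrite | github.com/aadi-tya-1711/Metadata-Mutation-Checker | backend/app/analyzer.py | _to_simple_explanation
-- ===== SOURCE A (Python) =====
-- def _to_simple_explanation(text: str) -> str:
--     """Convert technical wording to a clearer non-technical variant."""
--     if not text:
--         return text
--     replacements = {
--         "document information dictionary": "document metadata",
--         "incrementally saved": "saved multiple times",
--         "originator tool": "original authoring tool",
--         "producer field": "export tool field",
--         "creation date": "first saved date",
--         "modification date": "last saved date",
--         "warrants review": "is worth checking",
--     }
--     out = text
--     for old, new in replacements.items():
--         out = out.replace(old, new)
--     return out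
-- ===== SOURCE B (Python) =====
-- _PAIRS = [
--     ("document information dictionary", "document metadata"),
--     ("incrementally saved", "saved multiple times"),
--     ("originator tool", "original authoring tool"),
--     ("producer field", "export tool field"),
--     ("creation date", "first saved date"),
--     ("modification date", "last saved date"),
--     ("warrants review", "is worth checking"),
-- ]
--
--
-- def _substitute(pairs, text):
--     if not pairs:
--         return text
--     old, new = pairs[0]
--     return _substitute(pairs[1:], new.join(text.split(old)))
--
--
-- def _to_simple_explanation(text: str) -> str:
--     """Convert technical wording to a clearer non-technical variant."""
--     if not text:
--         return text
--     return _substitute(_PAIRS, text)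
-- ===== Notes on version B (the rewrite author's own statement) =====
-- stated objective: alternative
-- what changed: B recurses over the phrase list and performs each rewrite by splitting on the key and joining with the value, instead of A's imperative loop of chained str.replace calls on an accumulator.
import Mathlib
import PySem

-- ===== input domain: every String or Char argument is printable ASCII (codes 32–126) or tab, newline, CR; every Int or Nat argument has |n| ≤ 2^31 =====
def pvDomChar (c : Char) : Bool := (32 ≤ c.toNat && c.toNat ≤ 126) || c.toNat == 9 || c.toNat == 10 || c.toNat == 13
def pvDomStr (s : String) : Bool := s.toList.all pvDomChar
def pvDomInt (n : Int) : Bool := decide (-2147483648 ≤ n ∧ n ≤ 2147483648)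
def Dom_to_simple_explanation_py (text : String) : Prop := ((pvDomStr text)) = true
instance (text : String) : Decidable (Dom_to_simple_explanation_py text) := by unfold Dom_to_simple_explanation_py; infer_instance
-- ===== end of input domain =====

-- B replaces A's imperative loop of chained str.replace calls with a recursion over
-- the phrase list that performs each rewrite by split-on-key/join-with-value
-- (objective: alternative decomposition, same cost).

-- ===== PORT A =====
def to_simple_explanation_py (text : String) : String :=
  if text = "" then text
  else
    -- the dict literal has distinct keys: its items in insertion order are this list
    let replacements : List (String × String) :=
      [("document information dictionary", "document metadata"),
       ("incrementally saved", "saved multiple times"),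
       ("originator tool", "original authoring tool"),
       ("producer field", "export tool field"),
       ("creation date", "first saved date"),
       ("modification date", "last saved date"),
       ("warrants review", "is worth checking")]
    replacements.foldl (fun out p => PySem.Str.replace out p.1 p.2) text

-- ===== PORT B =====
def pvPairs : List (String × String) :=
  [("document information dictionary", "document metadata"),
   ("incrementally saved", "saved multiple times"),
   ("originator tool", "original authoring tool"),
   ("producer field", "export tool field"),
   ("creation date", "first saved date"),
   ("modification date", "last saved date"),
   ("warrants review", "is worth checking")]

-- t.split(old) for the NONEMPTY literal keys of pvPairs is exactly Chars.splitOn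
def pvSubstitute : List (String × String) → String → String
  | [], t => t
  | (old, new) :: rest, t =>
      pvSubstitute rest
        (PySem.Str.join new ((PySem.Chars.splitOn t.toList old.toList).map String.ofList))

def to_simple_explanation_py_alt (text : String) : String :=
  if text = "" then text else pvSubstitute pvPairs text

-- ===== PRECONDITION & SPEC =====
def Spec_to_simple_explanation_py (text : String) (out : String) : Prop := out = to_simple_explanation_py_alt text
instance (text : String) (out : String) : Decidable (Spec_to_simple_explanation_py text out) := by unfold Spec_to_simple_explanation_py; infer_instance

-- ===== CLAIM (what is proved, stated in full; the proofs are below) =====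
def Claim_equal_to_simple_explanation_py : Prop := ∀ (text : String), Dom_to_simple_explanation_py text → Spec_to_simple_explanation_py text (to_simple_explanation_py text)

-- ===== LEMMAS AND PROOFS =====

-- the completed parts of splitOn's accumulator, rendered the way replace.go keeps them
def pvAccJoin (new : List Char) : List (List Char) → List Char
  | [] => []
  | p :: rest => new.reverse ++ p.reverse ++ pvAccJoin new rest

-- forward rendering of a parts list with a separator after each part
def pvGJoin (new : List Char) : List (List Char) → List Char
  | [] => []
  | p :: rest => p ++ new ++ pvGJoin new rest

lemma pvGJoin_append_singleton (new y : List Char) (xs : List (List Char)) :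
    pvGJoin new (xs ++ [y]) = pvGJoin new xs ++ y ++ new := by
  induction xs with
  | nil => simp [pvGJoin]
  | cons p rest ih => simp [pvGJoin, ih]

lemma pvAccJoin_reverse (new : List Char) (acc : List (List Char)) :
    (pvAccJoin new acc).reverse = pvGJoin new acc.reverse := by
  induction acc with
  | nil => simp [pvAccJoin, pvGJoin]
  | cons p rest ih => simp [pvAccJoin, pvGJoin_append_singleton, ih]

lemma pvJoin_append_singleton (new q : List Char) (parts : List (List Char)) :
    PySem.Chars.join new (parts ++ [q]) = pvGJoin new parts ++ q := by
  induction parts with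
  | nil => simp [pvGJoin, PySem.Chars.join_singleton]
  | cons p rest ih =>
    cases rest with
    | nil => simp [PySem.Chars.join_cons_cons, PySem.Chars.join_singleton, pvGJoin]
    | cons r rs =>
      simp only [List.cons_append, PySem.Chars.join_cons_cons, pvGJoin]
      simpa [pvGJoin, List.append_assoc] using ih

lemma pvGo_join (old new : List Char) (hold : old ≠ []) :
    ∀ (fuel : Nat) (l cur : List Char) (acc : List (List Char)), l.length ≤ fuel →
      PySem.Chars.join new (PySem.Chars.splitOn.go old (fuel + 1) l cur acc)
        = PySem.Chars.replace.go old new fuel l (cur ++ pvAccJoin new acc) := by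
  intro fuel
  induction fuel with
  | zero =>
    intro l cur acc hl
    have hle : l = [] := List.eq_nil_of_length_eq_zero (Nat.le_zero.mp hl)
    subst hle
    simp [PySem.Chars.splitOn.go, PySem.Chars.replace.go, pvJoin_append_singleton,
          pvAccJoin_reverse]
  | succ f ih =>
    intro l cur acc hl
    cases l with
    | nil =>
      simp [PySem.Chars.splitOn.go, PySem.Chars.replace.go, pvJoin_append_singleton,
            pvAccJoin_reverse]
    | cons c t =>
      by_cases hpre : old.isPrefixOf (c :: t)
      · have hlen : (List.drop old.length (c :: t)).length ≤ f := by
          have h1 : 1 ≤ old.length := by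
            cases old with
            | nil => exact absurd rfl hold
            | cons a b => simp
          simp only [List.length_drop]
          omega
        have := ih (List.drop old.length (c :: t)) [] (cur.reverse :: acc) hlen
        simp only [PySem.Chars.splitOn.go, PySem.Chars.replace.go, hpre, if_pos]
        rw [this]
        simp [pvAccJoin]
      · have hlen : t.length ≤ f := by
          simpa using Nat.lt_succ_iff.mp (by simpa using hl)
        have := ih t (c :: cur) acc hlen
        simp only [PySem.Chars.splitOn.go, PySem.Chars.replace.go, hpre, if_neg,
                   Bool.false_eq_true, not_false_eq_true]
        rw [this]
        simp

lemma pvChars_split_join_eq_replace (s old new : List Char) (h : old ≠ []) :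
    PySem.Chars.join new (PySem.Chars.splitOn s old) = PySem.Chars.replace s old new := by
  have hne : old.isEmpty = false := by
    cases old with
    | nil => exact absurd rfl h
    | cons a b => rfl
  rw [PySem.Chars.splitOn, PySem.Chars.replace, hne]
  simpa [pvAccJoin] using pvGo_join old new h s.length s [] []

lemma pvStr_split_join_eq_replace (s old new : String) (h : old.toList ≠ []) :
    PySem.Str.join new ((PySem.Chars.splitOn s.toList old.toList).map String.ofList)
      = PySem.Str.replace s old new := by
  have h1 : (PySem.Str.join new ((PySem.Chars.splitOn s.toList old.toList).map String.ofList)).toList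
      = (PySem.Str.replace s old new).toList := by
    rw [PySem.Str.toList_join, PySem.Str.toList_replace, List.map_map]
    rw [show (List.map (String.toList ∘ String.ofList) (PySem.Chars.splitOn s.toList old.toList))
          = PySem.Chars.splitOn s.toList old.toList by
        apply List.map_id''; intro x; simp]
    exact pvChars_split_join_eq_replace s.toList old.toList new.toList h
  calc PySem.Str.join new ((PySem.Chars.splitOn s.toList old.toList).map String.ofList)
      = String.ofList (PySem.Str.join new ((PySem.Chars.splitOn s.toList old.toList).map String.ofList)).toList := String.ofList_toList.symm
    _ = String.ofList (PySem.Str.replace s old new).toList := by rw [h1]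
    _ = PySem.Str.replace s old new := String.ofList_toList

-- ===== VERDICT (by name: the statement is the Claim_ definition above) =====
theorem to_simple_explanation_py_spec : Claim_equal_to_simple_explanation_py := by
  intro text _
  unfold Spec_to_simple_explanation_py to_simple_explanation_py to_simple_explanation_py_alt
  by_cases h : text = ""
  · simp [h]
  · simp only [h, ite_false, pvPairs, pvSubstitute, List.foldl]
    rw [pvStr_split_join_eq_replace _ _ _ (by decide),
        pvStr_split_join_eq_replace _ _ _ (by decide),
        pvStr_split_join_eq_replace _ _ _ (by decide),
        pvStr_split_join_eq_replace _ _ _ (by decide),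
        pvStr_split_join_eq_replace _ _ _ (by decide),
        pvStr_split_join_eq_replace _ _ _ (by decide),
        pvStr_split_join_eq_replace _ _ _ (by decide)]
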